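-- pv_equiv track=rewrite | github.com/tuantnguyen95/POC-GA | src/service/luna/string_embed.py | replace_digit
-- ===== SOURCE A (Python) =====
-- import string
--
-- max_length = 30 # A word maximum length is required by Embedding model
--
-- map_digits = ['zero','one','two','three','four','five','six','seven','eight','nine']
--
-- def replace_digit(word):
--   text = word
--   for digit in string.digits:
--     if digit in text:
--       text = text.replace(digit, map_digits[int(digit)])
--
--   if len(text) > max_length:
--     for digit in string.digits:
--       if digit in word:
--         word = word.replace(digit, ' ' + map_digits[int(digit)] + ' ')
--     return word
--   else:
--     return text
-- ===== SOURCE B (Python) =====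
-- max_length = 30  # A word maximum length is required by Embedding model
--
-- def replace_digit(word):
--     names = {'0': 'zero', '1': 'one', '2': 'two', '3': 'three', '4': 'four',
--              '5': 'five', '6': 'six', '7': 'seven', '8': 'eight', '9': 'nine'}
--     plain_parts = []
--     spaced_parts = []
--     for ch in word:
--         name = names.get(ch)
--         if name is None:
--             plain_parts.append(ch)
--             spaced_parts.append(ch)
--         else:
--             plain_parts.append(name)
--             spaced_parts.append(' ' + name + ' ')
--     plain = ''.join(plain_parts)
--     if len(plain) > max_length:
--         return ''.join(spaced_parts)
--     return plain
-- ===== Notes on version B (the rewrite author's own statement) =====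
-- stated objective: alternative
-- what changed: Replaces A's two ten-iteration loops over the digit alphabet (each doing a str.replace scan of the whole string per digit, plus a second full re-scan of the original word when the result is too long) with a single character-driven pass over the word that builds both candidate strings (digit->name and digit->' name ') at once via a digit-name dictionary, then picks one by the length test.
import Mathlib
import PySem

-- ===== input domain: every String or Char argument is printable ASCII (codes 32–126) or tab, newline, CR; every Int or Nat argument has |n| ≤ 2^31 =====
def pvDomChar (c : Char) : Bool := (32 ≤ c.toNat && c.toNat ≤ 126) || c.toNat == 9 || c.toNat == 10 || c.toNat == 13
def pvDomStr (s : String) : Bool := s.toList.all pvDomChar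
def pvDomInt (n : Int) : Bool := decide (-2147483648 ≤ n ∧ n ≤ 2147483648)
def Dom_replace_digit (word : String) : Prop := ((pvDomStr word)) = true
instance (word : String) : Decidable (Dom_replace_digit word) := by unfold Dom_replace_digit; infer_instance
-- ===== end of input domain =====

-- B replaces A's two digit-alphabet replace loops by one single pass over the word's
-- characters that builds both candidate strings at once (objective: alternative decomposition).

-- ===== PORT A =====
-- string.digits
def pyDigits : List Char := "0123456789".toList
def map_digits : List String := ["zero","one","two","three","four","five","six","seven","eight","nine"]
-- map_digits[int(digit)]; for the ten digit characters this loop feeds it,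
-- int(digit) and the indexing always succeed, so the .getD "" default is never used.
def digitWord (d : Char) : String :=
  ((PySem.Int.ofStr? (String.ofList [d])).bind (fun i => PySem.List.pyGet? map_digits i)).getD ""

def replace_digit (word : String) : String :=
  let text := pyDigits.foldl (fun text d =>
      if PySem.Str.isIn (String.ofList [d]) text then
        PySem.Str.replace text (String.ofList [d]) (digitWord d)
      else text) word
  if 30 < PySem.Str.len text then
    pyDigits.foldl (fun w d =>
        if PySem.Str.isIn (String.ofList [d]) w then
          PySem.Str.replace w (String.ofList [d]) (" " ++ digitWord d ++ " ")
        else w) word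
  else text

-- ===== PORT B =====
def namesB : PySem.Dict Char String :=
  PySem.Dict.ofList [('0',"zero"),('1',"one"),('2',"two"),('3',"three"),('4',"four"),
                     ('5',"five"),('6',"six"),('7',"seven"),('8',"eight"),('9',"nine")]

def replace_digit_alt (word : String) : String :=
  let acc := word.toList.foldl (fun (acc : List String × List String) ch =>
      match PySem.Dict.get? namesB ch with
      | none => (acc.1 ++ [String.ofList [ch]], acc.2 ++ [String.ofList [ch]])
      | some name => (acc.1 ++ [name], acc.2 ++ [" " ++ name ++ " "])) ([], [])
  let plain := PySem.Str.join "" acc.1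
  if 30 < PySem.Str.len plain then PySem.Str.join "" acc.2 else plain

-- ===== PRECONDITION & SPEC =====
def Spec_replace_digit (word : String) (out : String) : Prop := out = replace_digit_alt word
instance (word : String) (out : String) : Decidable (Spec_replace_digit word out) := by unfold Spec_replace_digit; infer_instance

-- ===== CLAIM (what is proved, stated in full; the proofs are below) =====
def Claim_equal_replace_digit : Prop := ∀ (word : String), Dom_replace_digit word → Spec_replace_digit word (replace_digit word)

-- ===== LEMMAS AND PROOFS =====

-- per-character meaning of B's two accumulators
def nmP (ch : Char) : String :=
  match PySem.Dict.get? namesB ch with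
  | none => String.ofList [ch]
  | some n => n
def nmS (ch : Char) : String :=
  match PySem.Dict.get? namesB ch with
  | none => String.ofList [ch]
  | some n => " " ++ n ++ " "

-- the effect, on one character, of A's sequence of replaces for the digit list ds
def Gfn (newf : Char → List Char) : List Char → Char → List Char
  | [], c => [c]
  | d :: ds, c => (if c = d then newf d else [c]).flatMap (Gfn newf ds)

-- replace with a single-character pattern is a per-character flatMap
lemma go_single (d : Char) (new : List Char) :
    ∀ (s acc : List Char),
      PySem.Chars.replace.go [d] new s.length s acc
        = acc.reverse ++ s.flatMap (fun c => if c = d then new else [c]) := by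
  intro s
  induction s with
  | nil => intro acc; simp [PySem.Chars.replace.go]
  | cons c t ih =>
      intro acc
      rw [show (c :: t).length = t.length + 1 from rfl, PySem.Chars.replace.go]
      by_cases hc : c = d
      · subst hc
        simp [List.isPrefixOf, ih]
      · have : ([d].isPrefixOf (c :: t)) = false := by
          simp [List.isPrefixOf]; exact fun h => absurd h.symm hc
        simp [this, ih, hc]

lemma replace_single (d : Char) (new s : List Char) :
    PySem.Chars.replace s [d] new = s.flatMap (fun c => if c = d then new else [c]) := by
  have := go_single d new s []
  simpa [PySem.Chars.replace] using this

lemma flatMap_id_of_not_mem (d : Char) (new : List Char) :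
    ∀ (l : List Char), d ∉ l → l.flatMap (fun c => if c = d then new else [c]) = l := by
  intro l
  induction l with
  | nil => intro _; rfl
  | cons c t ih =>
      intro h
      have hc : c ≠ d := fun e => h (e ▸ List.mem_cons_self)
      have ht : d ∉ t := fun e => h (List.mem_cons_of_mem _ e)
      simp [hc, ih ht]

-- A's Str-level loop body, on toList
lemma stepA_toList (new : Char → String) (t : String) (d : Char) :
    (if PySem.Str.isIn (String.ofList [d]) t then
       PySem.Str.replace t (String.ofList [d]) (new d)
     else t).toList
      = t.toList.flatMap (fun c => if c = d then (new d).toList else [c]) := by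
  by_cases h : PySem.Str.isIn (String.ofList [d]) t = true
  · have h' : PySem.Chars.isIn [d] t.toList = true := by simpa using h
    simp [h', PySem.Str.toList_replace, replace_single]
  · have h' : PySem.Chars.isIn [d] t.toList = false := by
      cases hh : PySem.Chars.isIn [d] t.toList
      · rfl
      · exact absurd (by simpa using hh) h
    have hni : ¬ ([d] <:+: t.toList) := by
      intro hinf
      exact h ((PySem.Str.isIn_iff_infix _ _).mpr (by simpa using hinf))
    have hd : d ∉ t.toList := fun hm => hni ((List.singleton_infix_iff d t.toList).mpr hm)
    simp [h', flatMap_id_of_not_mem d _ _ hd]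

-- transport a foldl along toList
lemma foldl_toList {f : String → Char → String} {g : List Char → Char → List Char}
    (hfg : ∀ t d, (f t d).toList = g t.toList d) :
    ∀ (ds : List Char) (s : String), (ds.foldl f s).toList = ds.foldl g s.toList := by
  intro ds
  induction ds with
  | nil => intro s; rfl
  | cons d ds ih => intro s; simp [List.foldl_cons, ih, hfg]

lemma chain (newf : Char → List Char) :
    ∀ (ds : List Char) (s : List Char),
      ds.foldl (fun t d => t.flatMap (fun c => if c = d then newf d else [c])) s
        = s.flatMap (Gfn newf ds) := by
  intro ds
  induction ds with
  | nil => intro s; simp [Gfn]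
  | cons d ds ih =>
      intro s
      simp only [List.foldl_cons, ih, List.flatMap_assoc]
      rfl

lemma Gfn_not_mem (newf : Char → List Char) :
    ∀ (ds : List Char) (c : Char), c ∉ ds → Gfn newf ds c = [c] := by
  intro ds
  induction ds with
  | nil => intro c _; rfl
  | cons d ds ih =>
      intro c h
      have hc : c ≠ d := fun e => h (e ▸ List.mem_cons_self)
      have ht : c ∉ ds := fun e => h (List.mem_cons_of_mem _ e)
      simp [Gfn, hc, ih c ht]

lemma get?_none_of_not_digit (c : Char) (h : c ∉ pyDigits) :
    PySem.Dict.get? namesB c = none := by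
  have h0 : ¬ (c = '0' ∨ c = '1' ∨ c = '2' ∨ c = '3' ∨ c = '4' ∨ c = '5' ∨ c = '6' ∨ c = '7' ∨ c = '8' ∨ c = '9') := by
    simpa [pyDigits] using h
  push Not at h0
  obtain ⟨h₀, h₁, h₂, h₃, h₄, h₅, h₆, h₇, h₈, h₉⟩ := h0
  have hitems : namesB.items = [('0',"zero"),('1',"one"),('2',"two"),('3',"three"),('4',"four"),
      ('5',"five"),('6',"six"),('7',"seven"),('8',"eight"),('9',"nine")] := by rfl
  simp [PySem.Dict.get?, hitems, beq_iff_eq, Ne.symm h₀, Ne.symm h₁, Ne.symm h₂, Ne.symm h₃,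
        Ne.symm h₄, Ne.symm h₅, Ne.symm h₆, Ne.symm h₇, Ne.symm h₈, Ne.symm h₉]

lemma Gfn_plain (c : Char) :
    Gfn (fun d => (digitWord d).toList) pyDigits c = (nmP c).toList := by
  by_cases hc : c ∈ pyDigits
  · have : c = '0' ∨ c = '1' ∨ c = '2' ∨ c = '3' ∨ c = '4' ∨ c = '5' ∨ c = '6' ∨ c = '7' ∨ c = '8' ∨ c = '9' := by
      simpa [pyDigits] using hc
    rcases this with h|h|h|h|h|h|h|h|h|h <;> subst h <;> decide
  · rw [Gfn_not_mem _ _ _ hc]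
    simp [nmP, get?_none_of_not_digit c hc]

lemma Gfn_spaced (c : Char) :
    Gfn (fun d => (" " ++ digitWord d ++ " ").toList) pyDigits c = (nmS c).toList := by
  by_cases hc : c ∈ pyDigits
  · have : c = '0' ∨ c = '1' ∨ c = '2' ∨ c = '3' ∨ c = '4' ∨ c = '5' ∨ c = '6' ∨ c = '7' ∨ c = '8' ∨ c = '9' := by
      simpa [pyDigits] using hc
    rcases this with h|h|h|h|h|h|h|h|h|h <;> subst h <;> decide
  · rw [Gfn_not_mem _ _ _ hc]
    simp [nmS, get?_none_of_not_digit c hc]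

-- A's two loops, characterised per character
lemma loopA_toList (new : Char → String) (word : String) :
    (pyDigits.foldl (fun t d =>
        if PySem.Str.isIn (String.ofList [d]) t then
          PySem.Str.replace t (String.ofList [d]) (new d)
        else t) word).toList
      = word.toList.flatMap (Gfn (fun d => (new d).toList) pyDigits) := by
  rw [foldl_toList (g := fun t d => t.flatMap (fun c => if c = d then (new d).toList else [c]))
        (fun t d => stepA_toList new t d) pyDigits word, chain]

-- B's pair fold splits into two appends-folds
lemma foldB_split (l : List Char) (a b : List String) :
    l.foldl (fun (acc : List String × List String) ch =>
        match PySem.Dict.get? namesB ch with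
        | none => (acc.1 ++ [String.ofList [ch]], acc.2 ++ [String.ofList [ch]])
        | some name => (acc.1 ++ [name], acc.2 ++ [" " ++ name ++ " "])) (a, b)
      = (a ++ l.map nmP, b ++ l.map nmS) := by
  induction l generalizing a b with
  | nil => simp
  | cons c t ih =>
      have hstep : (match PySem.Dict.get? namesB c with
        | none => (a ++ [String.ofList [c]], b ++ [String.ofList [c]])
        | some name => (a ++ [name], b ++ [" " ++ name ++ " "]))
          = (a ++ [nmP c], b ++ [nmS c]) := by
        cases h : PySem.Dict.get? namesB c <;> simp [nmP, nmS, h]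
      simp only [List.foldl_cons, hstep, ih, List.map_cons]
      simp

lemma join_nil_flatten (xs : List (List Char)) :
    PySem.Chars.join [] xs = xs.flatten := by
  induction xs with
  | nil => rfl
  | cons h t ih =>
      cases t <;> simp_all [PySem.Chars.join, List.intercalate, List.intersperse]

lemma join_empty_toList (parts : List String) :
    (PySem.Str.join "" parts).toList = (parts.map String.toList).flatten := by
  rw [PySem.Str.toList_join]
  simpa using join_nil_flatten (parts.map String.toList)

-- ===== VERDICT (by name: the statement is the Claim_ definition above) =====
theorem replace_digit_spec : Claim_equal_replace_digit := by
  intro word _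
  unfold Spec_replace_digit replace_digit replace_digit_alt
  simp only [foldB_split word.toList [] [], List.nil_append]
  have hplainA := loopA_toList digitWord word
  have hspacedA := loopA_toList (fun d => " " ++ digitWord d ++ " ") word
  have hplain :
      (pyDigits.foldl (fun t d =>
        if PySem.Str.isIn (String.ofList [d]) t then
          PySem.Str.replace t (String.ofList [d]) (digitWord d)
        else t) word) = PySem.Str.join "" (word.toList.map nmP) := by
    apply String.toList_inj.mp
    rw [hplainA, join_empty_toList]
    rw [funext Gfn_plain]
    simp [List.flatMap, Function.comp_def]
  have hspaced :
      (pyDigits.foldl (fun w d =>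
        if PySem.Str.isIn (String.ofList [d]) w then
          PySem.Str.replace w (String.ofList [d]) (" " ++ digitWord d ++ " ")
        else w) word) = PySem.Str.join "" (word.toList.map nmS) := by
    apply String.toList_inj.mp
    rw [hspacedA, join_empty_toList]
    rw [funext Gfn_spaced]
    simp [List.flatMap, Function.comp_def]
  rw [hplain, hspaced]
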